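-- pv_equiv track=rewrite | github.com/sandeepny441/code_101 | Pradeep/easy_385.py | solve
-- ===== SOURCE A (Python) =====
-- def solve(s):
--     i = 0
--     got_R = False
--     left_pos = False
--     right_pos = False
--     while i < len(s):
--         if s[i] == 'B':
--             if got_R:
--                 left_pos = True
--                 break
--             else:
--                 break
--         if s[i] == 'R':
--             got_R = True
--         i += 1
--
--     if left_pos:
--         return left_pos
--
--     i = len(s) - 1
--     got_R = False
--     while i >= 0:
--         if s[i] == 'B':
--             if got_R:
--                 right_pos = True
--                 break
--             else:
--                 break
--         if s[i] == 'R':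
--             got_R = True
--         i -= 1
--
--     return right_pos
-- ===== SOURCE B (Python) =====
-- def solve(s):
--     # Single pass collecting boundary indices, then a pure arithmetic verdict:
--     # True iff both letters occur and the first 'R' precedes the first 'B'
--     # or the last 'R' follows the last 'B'.
--     first_b = first_r = last_b = last_r = -1
--     for i, c in enumerate(s):
--         if c == 'B':
--             if first_b < 0:
--                 first_b = i
--             last_b = i
--         elif c == 'R':
--             if first_r < 0:
--                 first_r = i
--             last_r = i
--     return first_b >= 0 and first_r >= 0 and (first_r < first_b or last_b < last_r)
-- ===== Notes on version B (the rewrite author's own statement) =====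
-- stated objective: alternative
-- what changed: Replaces A's two directional early-exit flag scans (forward then backward with got_R/break state and s[i] indexing) by a single enumerate pass that collects the four boundary indices (first/last occurrence of 'B' and of 'R') and then decides by pure index arithmetic: first_r < first_b or last_b < last_r.
import Mathlib
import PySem

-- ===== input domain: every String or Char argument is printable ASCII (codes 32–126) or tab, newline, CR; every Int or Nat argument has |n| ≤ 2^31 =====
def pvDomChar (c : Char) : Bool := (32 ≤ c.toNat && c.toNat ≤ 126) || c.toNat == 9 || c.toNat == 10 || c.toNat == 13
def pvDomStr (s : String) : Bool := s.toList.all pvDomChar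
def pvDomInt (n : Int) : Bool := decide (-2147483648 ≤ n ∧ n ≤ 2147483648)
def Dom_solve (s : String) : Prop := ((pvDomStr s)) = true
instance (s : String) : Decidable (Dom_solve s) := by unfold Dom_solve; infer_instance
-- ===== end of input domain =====

-- B replaces A's two directional early-exit flag scans by a single full pass that collects the
-- four boundary indices (first/last 'B', first/last 'R') and decides by index arithmetic;
-- objective: alternative (same cost, different algorithmic state).

-- ===== PORT A =====
-- A's two while-loops are the same flagged scan, run over the characters left-to-right and then
-- right-to-left (i = len(s)-1 … 0 is the scan of the reversed character list).
def solveScan : List Char → Bool → Bool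
  | [], _ => false
  | c :: cs, gotR =>
    if c = 'B' then gotR
    else if c = 'R' then solveScan cs true
    else solveScan cs gotR

def solve (s : String) : Bool :=
  let left_pos := solveScan s.toList false
  if left_pos then left_pos
  else solveScan s.toList.reverse false

-- ===== PORT B =====
-- for i, c in enumerate(s): carry the running index i and the four boundary indices.
def collect : List Char → Int → Int × Int × Int × Int → Int × Int × Int × Int
  | [], _, st => st
  | c :: cs, i, (fB, fR, lB, lR) =>
    if c = 'B' then collect cs (i + 1) ((if fB < 0 then i else fB), fR, i, lR)
    else if c = 'R' then collect cs (i + 1) (fB, (if fR < 0 then i else fR), lB, i)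
    else collect cs (i + 1) (fB, fR, lB, lR)

def solve_alt (s : String) : Bool :=
  match collect s.toList 0 (-1, -1, -1, -1) with
  | (fB, fR, lB, lR) => decide (0 ≤ fB) && decide (0 ≤ fR) && (decide (fR < fB) || decide (lB < lR))

-- ===== PRECONDITION & SPEC =====
def Spec_solve (s : String) (out : Bool) : Prop := out = solve_alt s
instance (s : String) (out : Bool) : Decidable (Spec_solve s out) := by unfold Spec_solve; infer_instance

-- ===== CLAIM (what is proved, stated in full; the proofs are below) =====
def Claim_equal_solve : Prop := ∀ (s : String), Dom_solve s → Spec_solve s (solve s)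

-- ===== LEMMAS AND PROOFS =====

-- A's flagged scan returns: 'B' occurs, and either the flag was set or some 'R' precedes the first 'B'.
lemma scan_char (l : List Char) (g : Bool) :
    solveScan l g =
      (decide ('B' ∈ l) && (g || (decide ('R' ∈ l) && decide (l.idxOf 'R' < l.idxOf 'B')))) := by
  induction l generalizing g with
  | nil => simp [solveScan]
  | cons c cs ih =>
    by_cases hB : c = 'B'
    · subst hB
      simp [solveScan, List.idxOf_cons]
    · by_cases hR : c = 'R'
      · subst hR
        have h1 : ('R' :: cs).idxOf 'R' = 0 := by simp [List.idxOf_cons]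
        have h2 : ('R' :: cs).idxOf 'B' = cs.idxOf 'B' + 1 := by
          simp [List.idxOf_cons]
        simp [solveScan, ih, h1, h2, hB]
      · have h1 : (c :: cs).idxOf 'R' = cs.idxOf 'R' + 1 := by simp [List.idxOf_cons, hR]
        have h2 : (c :: cs).idxOf 'B' = cs.idxOf 'B' + 1 := by simp [List.idxOf_cons, hB]
        simp [solveScan, hB, hR, ih, h1, h2, Ne.symm hB, Ne.symm hR]

-- B's single pass, in closed form: each component is the corresponding boundary index.
lemma collect_char (l : List Char) (i fB fR lB lR : Int) (hi : 0 ≤ i) :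
    collect l i (fB, fR, lB, lR) =
      ((if 0 ≤ fB then fB else if 'B' ∈ l then i + l.idxOf 'B' else fB),
       (if 0 ≤ fR then fR else if 'R' ∈ l then i + l.idxOf 'R' else fR),
       (if 'B' ∈ l then i + ((l.length : Int) - 1 - l.reverse.idxOf 'B') else lB),
       (if 'R' ∈ l then i + ((l.length : Int) - 1 - l.reverse.idxOf 'R') else lR)) := by
  induction l generalizing i fB fR lB lR with
  | nil => simp [collect]
  | cons c cs ih =>
    by_cases hB : c = 'B'
    · subst hB
      rw [collect, if_pos rfl, ih _ _ _ _ _ (by omega)]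
      have hiB : ('B' :: cs).idxOf 'B' = 0 := by simp [List.idxOf_cons]
      have hiR : ('B' :: cs).idxOf 'R' = cs.idxOf 'R' + 1 := by simp [List.idxOf_cons]
      have haB : (cs.reverse ++ ['B']).idxOf 'B'
          = if 'B' ∈ cs then cs.reverse.idxOf 'B' else cs.reverse.length := by
        rw [List.idxOf_append]; simp [List.idxOf_cons]
      have haR : 'R' ∈ cs → (cs.reverse ++ ['B']).idxOf 'R' = cs.reverse.idxOf 'R' := by
        intro h; rw [List.idxOf_append]; simp [h]
      refine Prod.ext ?_ (Prod.ext ?_ (Prod.ext ?_ ?_)) <;>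
        simp [hiB, hiR, haB, List.reverse_cons]
      · split_ifs <;> omega
      · split_ifs with h1 h2 <;> simp_all <;> omega
      · have hb := List.idxOf_le_length (l := cs.reverse) (a := 'B')
        split_ifs with h <;> simp_all <;> omega
      · by_cases h : 'R' ∈ cs
        · have hr := List.idxOf_le_length (l := cs.reverse) (a := 'R')
          simp [h, haR h]; omega
        · simp [h]
    · by_cases hR : c = 'R'
      · subst hR
        rw [collect, if_neg (by decide), if_pos rfl, ih _ _ _ _ _ (by omega)]
        have hiB : ('R' :: cs).idxOf 'B' = cs.idxOf 'B' + 1 := by simp [List.idxOf_cons]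
        have hiR : ('R' :: cs).idxOf 'R' = 0 := by simp [List.idxOf_cons]
        have haR : (cs.reverse ++ ['R']).idxOf 'R'
            = if 'R' ∈ cs then cs.reverse.idxOf 'R' else cs.reverse.length := by
          rw [List.idxOf_append]; simp [List.idxOf_cons]
        have haB : 'B' ∈ cs → (cs.reverse ++ ['R']).idxOf 'B' = cs.reverse.idxOf 'B' := by
          intro h; rw [List.idxOf_append]; simp [h]
        refine Prod.ext ?_ (Prod.ext ?_ (Prod.ext ?_ ?_)) <;>
          simp [hiB, hiR, haR, List.reverse_cons, hB]
        · split_ifs with h1 h2 <;> simp_all <;> omega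
        · split_ifs <;> omega
        · by_cases h : 'B' ∈ cs
          · have hb := List.idxOf_le_length (l := cs.reverse) (a := 'B')
            simp [h, haB h]; omega
          · simp [h]
        · have hr := List.idxOf_le_length (l := cs.reverse) (a := 'R')
          split_ifs with h <;> simp_all <;> omega
      · rw [collect, if_neg hB, if_neg hR, ih _ _ _ _ _ (by omega)]
        have hiB : (c :: cs).idxOf 'B' = cs.idxOf 'B' + 1 := by simp [List.idxOf_cons, hB]
        have hiR : (c :: cs).idxOf 'R' = cs.idxOf 'R' + 1 := by simp [List.idxOf_cons, hR]
        have haB : 'B' ∈ cs → (cs.reverse ++ [c]).idxOf 'B' = cs.reverse.idxOf 'B' := by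
          intro h; rw [List.idxOf_append]; simp [h]
        have haR : 'R' ∈ cs → (cs.reverse ++ [c]).idxOf 'R' = cs.reverse.idxOf 'R' := by
          intro h; rw [List.idxOf_append]; simp [h]
        refine Prod.ext ?_ (Prod.ext ?_ (Prod.ext ?_ ?_)) <;>
          simp [hiB, hiR, List.reverse_cons, hB, hR, Ne.symm hB, Ne.symm hR]
        · split_ifs with h1 h2 <;> simp_all <;> omega
        · split_ifs with h1 h2 <;> simp_all <;> omega
        · by_cases h : 'B' ∈ cs
          · have hb := List.idxOf_le_length (l := cs.reverse) (a := 'B')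
            simp [h, haB h]; omega
          · simp [h]
        · by_cases h : 'R' ∈ cs
          · have hr := List.idxOf_le_length (l := cs.reverse) (a := 'R')
            simp [h, haR h]; omega
          · simp [h]

-- ===== VERDICT (by name: the statement is the Claim_ definition above) =====
theorem solve_spec : Claim_equal_solve := by
  intro s _
  unfold Spec_solve solve solve_alt
  rw [collect_char _ _ _ _ _ _ (le_refl 0), scan_char, scan_char]
  set l := s.toList with hl
  by_cases hB : 'B' ∈ l
  · by_cases hR : 'R' ∈ l
    · have hbr := List.idxOf_lt_length_iff.mpr (List.mem_reverse.mpr hB)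
      have hrr := List.idxOf_lt_length_iff.mpr (List.mem_reverse.mpr hR)
      simp only [List.length_reverse] at hbr hrr
      simp [hB, hR, List.mem_reverse]
    · simp [hB, hR, List.mem_reverse]
  · simp [hB, List.mem_reverse]
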